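-- pv_equiv track=rewrite | github.com/oljakon/hexagon-network | game/city.py | get_at_pixel
-- ===== SOURCE A (Python) =====
-- def get_at_pixel(x, y):
--     '''Находит кнопку по координатам'''
--     X1_MINUS = 442
--     X2_MINUS = 487
--     X1_PLUS = 552
--     X2_PLUS = 596
--     X1_OK = 626
--     X2_OK = 688
--     Y_POS = 243
--     Y_SHIFT = 42
--     Y0_SHIFT = 22
--     button = 0
--     if x > X1_MINUS and x < X2_MINUS:
--         start = 1
--         stop = 5
--         for i in range(start, stop):
--             if y > (Y_POS + Y0_SHIFT*(i-start) + Y_SHIFT*(i-start)) \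
--                     and y < (Y_POS + Y0_SHIFT*(i-start) + Y_SHIFT*i):
--                 button = i
--                 break
--
--     elif x > X1_PLUS and x < X2_PLUS:
--         start = 5
--         stop = 9
--         for i in range(start, stop):
--             if y > (Y_POS + Y0_SHIFT*(i-start) + Y_SHIFT*(i-start))\
--                     and y < (Y_POS + Y0_SHIFT*(i-start) + Y_SHIFT*(i-start+1)):
--                 button = i
--                 break
--
--     elif x > X1_OK and x < X2_OK and y > Y_POS and y < (Y_POS + Y_SHIFT):
--         button = 9
--
--     return button
-- ===== SOURCE B (Python) =====
-- def get_at_pixel(x, y):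
--     '''Находит кнопку по координатам'''
--     if 442 < x < 487:
--         base = 1
--     elif 552 < x < 596:
--         base = 5
--     elif 626 < x < 688:
--         return 9 if 243 < y < 285 else 0
--     else:
--         return 0
--     k = (y - 244) // 64
--     if 0 <= k <= 3 and y < 285 + 64 * k:
--         return base + k
--     return 0
-- ===== Notes on version B (the rewrite author's own statement) =====
-- stated objective: simpler
-- what changed: Replaces the per-band range scan with a closed-form floor division computing the row index k = (y-244)//64, plus one bound check; the OK column becomes the k=0 band check.
import Mathlib
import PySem

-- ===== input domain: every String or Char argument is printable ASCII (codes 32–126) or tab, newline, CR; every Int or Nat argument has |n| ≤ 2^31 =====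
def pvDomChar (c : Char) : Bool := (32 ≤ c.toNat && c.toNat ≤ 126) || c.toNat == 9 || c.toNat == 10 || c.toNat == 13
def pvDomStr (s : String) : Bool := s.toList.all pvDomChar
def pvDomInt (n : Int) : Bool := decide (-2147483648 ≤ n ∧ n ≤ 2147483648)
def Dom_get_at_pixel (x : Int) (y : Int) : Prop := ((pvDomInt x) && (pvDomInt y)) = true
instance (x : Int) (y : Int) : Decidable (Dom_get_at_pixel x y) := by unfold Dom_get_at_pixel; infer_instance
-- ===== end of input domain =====

-- B replaces A's per-band range scan with a closed-form floor division for the row index (objective: simpler).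

-- ===== PORT A =====
-- the 'for i in range(1,5)' loop with break, minus column (button stays 0 if no band matches)
def pvLoopMinus (y : Int) : List Int → Int
  | [] => 0
  | i :: rest =>
      if 243 + 22 * (i - 1) + 42 * (i - 1) < y ∧ y < 243 + 22 * (i - 1) + 42 * i then i
      else pvLoopMinus y rest

-- the 'for i in range(5,9)' loop with break, plus column
def pvLoopPlus (y : Int) : List Int → Int
  | [] => 0
  | i :: rest =>
      if 243 + 22 * (i - 5) + 42 * (i - 5) < y ∧ y < 243 + 22 * (i - 5) + 42 * (i - 5 + 1) then i
      else pvLoopPlus y rest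

def get_at_pixel (x : Int) (y : Int) : Int :=
  if 442 < x ∧ x < 487 then pvLoopMinus y (PySem.List.pyRange 1 5 1)
  else if 552 < x ∧ x < 596 then pvLoopPlus y (PySem.List.pyRange 5 9 1)
  else if 626 < x ∧ x < 688 ∧ 243 < y ∧ y < 243 + 42 then 9
  else 0

-- ===== PORT B =====
-- shared row computation of Source B after the column dispatch
def pvAltRow (base : Int) (y : Int) : Int :=
  let k := PySem.Int.floordiv (y - 244) 64
  if 0 ≤ k ∧ k ≤ 3 ∧ y < 285 + 64 * k then base + k else 0

def get_at_pixel_alt (x : Int) (y : Int) : Int :=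
  if 442 < x ∧ x < 487 then pvAltRow 1 y
  else if 552 < x ∧ x < 596 then pvAltRow 5 y
  else if 626 < x ∧ x < 688 then (if 243 < y ∧ y < 285 then 9 else 0)
  else 0

-- ===== PRECONDITION & SPEC =====
def Spec_get_at_pixel (x : Int) (y : Int) (out : Int) : Prop := out = get_at_pixel_alt x y
instance (x : Int) (y : Int) (out : Int) : Decidable (Spec_get_at_pixel x y out) := by unfold Spec_get_at_pixel; infer_instance

-- ===== CLAIM (what is proved, stated in full; the proofs are below) =====
def Claim_equal_get_at_pixel : Prop := ∀ (x : Int) (y : Int), Dom_get_at_pixel x y → Spec_get_at_pixel x y (get_at_pixel x y)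

-- ===== LEMMAS AND PROOFS =====

theorem pvFdiv_bounds (y : Int) :
    64 * PySem.Int.floordiv (y - 244) 64 ≤ y - 244 ∧
    y - 244 < 64 * PySem.Int.floordiv (y - 244) 64 + 64 := by
  have h1 := PySem.Int.floordiv_mul_add_mod (y - 244) 64
  have h2 := PySem.Int.mod_nonneg (y - 244) (b := 64) (by norm_num)
  have h3 := PySem.Int.mod_lt (y - 244) (b := 64) (by norm_num)
  constructor <;> omega

theorem pvLoopMinus_eq (y : Int) :
    pvLoopMinus y (PySem.List.pyRange 1 5 1) = pvAltRow 1 y := by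
  have hr : PySem.List.pyRange 1 5 1 = [1, 2, 3, 4] := by decide
  have hb := pvFdiv_bounds y
  rw [hr]
  simp only [pvLoopMinus, pvAltRow]
  split_ifs <;> omega

theorem pvLoopPlus_eq (y : Int) :
    pvLoopPlus y (PySem.List.pyRange 5 9 1) = pvAltRow 5 y := by
  have hr : PySem.List.pyRange 5 9 1 = [5, 6, 7, 8] := by decide
  have hb := pvFdiv_bounds y
  rw [hr]
  simp only [pvLoopPlus, pvAltRow]
  split_ifs <;> omega

-- ===== VERDICT (by name: the statement is the Claim_ definition above) =====
theorem get_at_pixel_spec : Claim_equal_get_at_pixel := by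
  intro x y _
  unfold Spec_get_at_pixel get_at_pixel get_at_pixel_alt
  split_ifs with h1 h2 h3 h4 h5 <;>
    first
      | exact pvLoopMinus_eq y
      | exact pvLoopPlus_eq y
      | rfl
      | omega
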